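-- pv_equiv track=rewrite | github.com/SwiftAkira/KAI | scripts/bench_phase1.py | generate_scripted_conversation
-- ===== SOURCE A (Python) =====
-- def generate_scripted_conversation(turns: int):
--     """Generates a simple, alternating conversation for benchmarking."""
--     base_phrases = [
--         "this is great",
--         "this is wonderful",
--         "this is fine",
--         "i am so happy",
--         "i am so joyful",
--         "i feel good",
--         "what a wonderful day",
--         "what a beautiful day",
--         "the weather is nice",
--         "i love this so much",
--         "i like this a lot",
--         "i don't mind this"
--     ]
--     return [base_phrases[i % len(base_phrases)] for i in range(turns)]
-- ===== SOURCE B (Python) =====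
-- def generate_scripted_conversation(turns: int):
--     """Generates a simple, alternating conversation for benchmarking."""
--     base_phrases = [
--         "this is great",
--         "this is wonderful",
--         "this is fine",
--         "i am so happy",
--         "i am so joyful",
--         "i feel good",
--         "what a wonderful day",
--         "what a beautiful day",
--         "the weather is nice",
--         "i love this so much",
--         "i like this a lot",
--         "i don't mind this"
--     ]
--     reps = turns // len(base_phrases) + 1
--     return (base_phrases * reps)[:turns]
-- ===== Notes on version B (the rewrite author's own statement) =====
-- stated objective: simpler
-- what changed: B replaces the per-element modulo-indexing comprehension with whole-list repetition (base_phrases * (turns//12 + 1)) followed by a slice [:turns].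
import Mathlib
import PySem

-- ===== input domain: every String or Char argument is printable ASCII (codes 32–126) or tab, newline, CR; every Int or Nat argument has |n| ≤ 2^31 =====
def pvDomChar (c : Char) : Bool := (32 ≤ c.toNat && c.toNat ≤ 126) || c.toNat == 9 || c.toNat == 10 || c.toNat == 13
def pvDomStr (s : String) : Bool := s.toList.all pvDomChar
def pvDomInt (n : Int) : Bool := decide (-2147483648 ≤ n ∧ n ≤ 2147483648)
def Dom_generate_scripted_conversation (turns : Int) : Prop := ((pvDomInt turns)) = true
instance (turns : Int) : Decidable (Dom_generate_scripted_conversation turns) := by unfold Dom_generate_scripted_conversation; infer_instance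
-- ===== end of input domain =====

-- B builds the result by whole-block list repetition plus one truncating slice instead of a
-- per-element modulo-indexed comprehension (objective: simpler; same return value).

-- the 12 base phrases, shared verbatim by both programs
def pvBasePhrases : List String :=
  ["this is great", "this is wonderful", "this is fine", "i am so happy",
   "i am so joyful", "i feel good", "what a wonderful day", "what a beautiful day",
   "the weather is nice", "i love this so much", "i like this a lot", "i don't mind this"]

-- ===== PORT A =====
def generate_scripted_conversation (turns : Int) : List String :=
  -- i % len(base_phrases) lies in [0, 12), so base_phrases[...] never raises; pyGetD is exact here
  (PySem.List.pyRange 0 turns 1).map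
    (fun i => PySem.List.pyGetD pvBasePhrases (PySem.Int.mod i (pvBasePhrases.length : Int)) "")

-- ===== PORT B =====
def generate_scripted_conversation_alt (turns : Int) : List String :=
  -- reps = turns // len(base_phrases) + 1; base_phrases * reps (empty for reps ≤ 0); then [:turns]
  PySem.List.slice
    ((List.replicate (PySem.Int.floordiv turns (pvBasePhrases.length : Int) + 1).toNat
      pvBasePhrases).flatten) none (some turns)

-- ===== PRECONDITION & SPEC =====
def Spec_generate_scripted_conversation (turns : Int) (out : List String) : Prop := out = generate_scripted_conversation_alt turns
instance (turns : Int) (out : List String) : Decidable (Spec_generate_scripted_conversation turns out) := by unfold Spec_generate_scripted_conversation; infer_instance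

-- ===== CLAIM (what is proved, stated in full; the proofs are below) =====
def Claim_equal_generate_scripted_conversation : Prop := ∀ (turns : Int), Dom_generate_scripted_conversation turns → Spec_generate_scripted_conversation turns (generate_scripted_conversation turns)

-- ===== LEMMAS AND PROOFS =====

theorem getElem?_flatten_replicate {α : Type} (l : List α) (m k : Nat)
    (hk : k < m * l.length) :
    ((List.replicate m l).flatten)[k]? = l[k % l.length]? := by
  induction m generalizing k with
  | zero => omega
  | succ m ih =>
    rw [List.replicate_succ, List.flatten_cons]
    by_cases h : k < l.length
    · rw [List.getElem?_append_left h, Nat.mod_eq_of_lt h]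
    · have hle : l.length ≤ k := by omega
      have hmul : (m + 1) * l.length = m * l.length + l.length := by ring
      rw [List.getElem?_append_right hle, ih (k - l.length) (by omega)]
      have hm : (k - l.length) % l.length = k % l.length := by
        conv_rhs => rw [show k = (k - l.length) + l.length from by omega]
        rw [Nat.add_mod_right]
      rw [hm]

theorem gsc_eq (turns : Int) :
    generate_scripted_conversation turns = generate_scripted_conversation_alt turns := by
  unfold generate_scripted_conversation generate_scripted_conversation_alt
  have hlen12 : pvBasePhrases.length = 12 := by decide
  rw [hlen12]
  by_cases hpos : 0 < turns
  · -- turns > 0: both lists have turns.toNat elements, the k-th being base[k % 12]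
    set n : Nat := turns.toNat with hn
    have ht : turns = (n : Int) := by omega
    have hdm := Nat.div_add_mod n 12
    have hml : n % 12 < 12 := Nat.mod_lt n (by omega)
    have hbound : n < (n / 12 + 1) * 12 := by omega
    have hrep : (PySem.Int.floordiv ((n:Int)) ((12:Nat) : Int) + 1).toNat = n / 12 + 1 := by
      rw [PySem.Int.floordiv_natCast]
      omega
    rw [ht, hrep, PySem.List.slice_to_natCast, PySem.List.pyRange_one]
    simp only [sub_zero, Int.toNat_natCast, List.map_map]
    have hflatlen : ((List.replicate (n / 12 + 1) pvBasePhrases).flatten).length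
        = (n / 12 + 1) * 12 := by
      rw [List.length_flatten, List.map_replicate, hlen12, List.sum_replicate, smul_eq_mul]
    apply List.ext_getElem?
    intro k
    by_cases hk : k < n
    · rw [List.getElem?_take_of_lt hk,
          getElem?_flatten_replicate pvBasePhrases (n / 12 + 1) k (by rw [hlen12]; omega),
          List.getElem?_map, List.getElem?_range hk]
      simp only [Function.comp, Option.map_some]
      have hmod : PySem.Int.mod ((0:Int) + (k:Int)) (((12:Nat)) : Int)
          = ((k % 12 : Nat) : Int) := by
        rw [zero_add, PySem.Int.mod_natCast]
      rw [hmod, hlen12, PySem.List.pyGetD_natCast,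
          List.getD_eq_getElem?_getD, List.getElem?_eq_getElem (by omega)]
      simp
    · rw [List.getElem?_eq_none (by rw [List.length_map, List.length_range]; omega),
          List.getElem?_eq_none (by rw [List.length_take, hflatlen]; omega)]
  · -- turns ≤ 0: both sides are []
    rw [PySem.List.pyRange_one_eq_nil (by omega), List.map_nil]
    rcases eq_or_lt_of_le (show turns ≤ 0 by omega) with h0 | hneg
    · rw [h0]
      decide
    · have h2 : (PySem.Int.floordiv turns ((12:Nat) : Int) + 1).toNat = 0 := by
        have heq := PySem.Int.floordiv_mul_add_mod turns 12
        have hge := PySem.Int.mod_nonneg turns (b := 12) (by omega)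
        have hlt := PySem.Int.mod_lt turns (b := 12) (by omega)
        have : PySem.Int.floordiv turns ((12:Nat) : Int) = PySem.Int.floordiv turns 12 := by
          norm_num
        rw [this]
        omega
      rw [h2]
      simp [PySem.List.slice]

-- ===== VERDICT (by name: the statement is the Claim_ definition above) =====
theorem generate_scripted_conversation_spec : Claim_equal_generate_scripted_conversation := by
  intro turns _
  unfold Spec_generate_scripted_conversation
  exact gsc_eq turns
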